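-- pv_equiv track=rewrite | github.com/diouri844/Py_prompt | Module/Calcule/__init__.py | get_dividers_tab
-- ===== SOURCE A (Python) =====
-- def get_dividers(element):
--     try:
--         resultat = []
--         limit = int(element)
--         element = int(element)
--         for contour in range(1,limit+1):
--             if element%contour==0:
--                 resultat.append(contour)
--         return resultat
--     except Exception as e:
--         return e
--
-- def get_dividers_tab(tab):
--     try:
--         resultat = []
--         for itr in range(len(tab)):
--             r = get_dividers(tab[itr])
--             resultat.append(r)
--         return resultat
--     except Exception as e:
--         return e
-- ===== SOURCE B (Python) =====
-- def get_dividers_tab(tab):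
--     result = []
--     for n in tab:
--         n = int(n)
--         small = []
--         large = []
--         i = 1
--         while i * i <= n:
--             if n % i == 0:
--                 small.append(i)
--                 q = n // i
--                 if i != q:
--                     large.append(q)
--             i += 1
--         result.append(small + large[::-1])
--     return result
-- ===== Notes on version B (the rewrite author's own statement) =====
-- stated objective: faster
-- what changed: Each element's divisors are found by trial division only up to sqrt(n), recording each divisor together with its cofactor, instead of testing every integer from 1 to n.
import Mathlib
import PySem

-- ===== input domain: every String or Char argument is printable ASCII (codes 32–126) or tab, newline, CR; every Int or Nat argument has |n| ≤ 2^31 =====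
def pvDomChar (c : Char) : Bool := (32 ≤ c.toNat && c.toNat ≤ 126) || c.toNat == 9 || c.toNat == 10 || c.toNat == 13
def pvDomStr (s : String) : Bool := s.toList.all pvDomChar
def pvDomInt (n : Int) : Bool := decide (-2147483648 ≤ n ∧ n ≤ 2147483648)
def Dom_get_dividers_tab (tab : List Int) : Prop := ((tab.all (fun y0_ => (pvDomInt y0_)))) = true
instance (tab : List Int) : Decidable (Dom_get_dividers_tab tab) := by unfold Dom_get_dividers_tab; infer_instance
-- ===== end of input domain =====

-- B replaces A's trial division over 1..n by trial division up to sqrt(n) collecting divisor/cofactor pairs (objective: faster, asymptotically).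

-- ===== PORT A =====
def get_dividers (element : Int) : List Int :=
  (PySem.List.pyRange 1 (element + 1) 1).foldl
    (fun resultat contour => if PySem.Int.mod element contour == 0 then resultat ++ [contour] else resultat) []

def get_dividers_tab (tab : List Int) : List (List Int) :=
  (PySem.List.pyRange 0 tab.length 1).foldl
    (fun resultat itr => resultat ++ [get_dividers (PySem.List.pyGetD tab itr 0)]) []

-- ===== PORT B =====
-- the 'while i*i <= n' loop of Source B, carrying (small, large)
def pvBLoop (n i : Int) (small large : List Int) : List Int × List Int :=
  if i * i ≤ n then
    if PySem.Int.mod n i == 0 then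
      let q := PySem.Int.floordiv n i
      pvBLoop n (i + 1) (small ++ [i]) (if i ≠ q then large ++ [q] else large)
    else pvBLoop n (i + 1) small large
  else (small, large)
termination_by (n + 1 - i).toNat
decreasing_by
  all_goals
    rename_i h _
    have hin : i ≤ n := by nlinarith [sq_nonneg i, sq_nonneg (i - 1)]
    omega

def pvDividersFast (n : Int) : List Int :=
  let p := pvBLoop n 1 [] []
  p.1 ++ p.2.reverse

def get_dividers_tab_alt (tab : List Int) : List (List Int) :=
  tab.foldl (fun result n => result ++ [pvDividersFast n]) []

-- ===== PRECONDITION & SPEC =====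
def Spec_get_dividers_tab (tab : List Int) (out : List (List Int)) : Prop := out = get_dividers_tab_alt tab
instance (tab : List Int) (out : List (List Int)) : Decidable (Spec_get_dividers_tab tab out) := by unfold Spec_get_dividers_tab; infer_instance

-- ===== CLAIM (what is proved, stated in full; the proofs are below) =====
def Claim_equal_get_dividers_tab : Prop := ∀ (tab : List Int), Dom_get_dividers_tab tab → Spec_get_dividers_tab tab (get_dividers_tab tab)

-- ===== LEMMAS AND PROOFS =====

-- the part of small / large the loop still has to produce from counter i on
def pvS (n i : Int) : List Int :=
  (PySem.List.pyRange i (n + 1) 1).filter (fun j => decide (j * j ≤ n) && (PySem.Int.mod n j == 0))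

def pvL (n i : Int) : List Int :=
  ((PySem.List.pyRange i (n + 1) 1).filter
      (fun j => decide (j * j ≤ n) && (PySem.Int.mod n j == 0) && decide (j ≠ PySem.Int.floordiv n j))).map
    (fun j => PySem.Int.floordiv n j)

lemma pvBLoop_spec (n : Int) : ∀ (d : Nat) (i : Int) (s l : List Int), 1 ≤ i →
    (n + 1 - i).toNat = d → pvBLoop n i s l = (s ++ pvS n i, l ++ pvL n i) := by
  intro d
  induction d with
  | zero =>
    intro i s l hi hd
    have hni : n + 1 ≤ i := by omega
    have hg : ¬ (i * i ≤ n) := by nlinarith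
    rw [pvBLoop, if_neg hg]
    simp [pvS, pvL, PySem.List.pyRange_one_eq_nil hni]
  | succ d ih =>
    intro i s l hi hd
    have hin : i ≤ n := by omega
    by_cases hg : i * i ≤ n
    · have hcons : PySem.List.pyRange i (n + 1) 1 = i :: PySem.List.pyRange (i + 1) (n + 1) 1 :=
        PySem.List.pyRange_one_cons (by omega)
      have hS : pvS n i = (if (decide (i * i ≤ n) && (PySem.Int.mod n i == 0)) = true
          then i :: pvS n (i + 1) else pvS n (i + 1)) := by
        rw [pvS, hcons, List.filter_cons]; rfl
      have hL : pvL n i = (if (decide (i * i ≤ n) && (PySem.Int.mod n i == 0) &&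
            decide (i ≠ PySem.Int.floordiv n i)) = true
          then PySem.Int.floordiv n i :: pvL n (i + 1) else pvL n (i + 1)) := by
        rw [pvL, hcons, List.filter_cons]
        split <;> simp [pvL]
      have ihh : ∀ s' l', pvBLoop n (i + 1) s' l' = (s' ++ pvS n (i + 1), l' ++ pvL n (i + 1)) :=
        fun s' l' => ih (i + 1) s' l' (by omega) (by omega)
      rw [pvBLoop, if_pos hg, hS, hL]
      by_cases hm : (PySem.Int.mod n i == 0) = true
      · rw [if_pos hm]
        by_cases hq : i = PySem.Int.floordiv n i
        · show pvBLoop n (i + 1) (s ++ [i])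
              (if i ≠ PySem.Int.floordiv n i then l ++ [PySem.Int.floordiv n i] else l) = _
          rw [if_neg (show ¬ i ≠ PySem.Int.floordiv n i from fun hc => hc hq), ihh,
            if_pos (by simp [hg, hm]), if_neg (show ¬ _ = true by simp [hg, hm, ← hq])]
          simp
        · show pvBLoop n (i + 1) (s ++ [i])
              (if i ≠ PySem.Int.floordiv n i then l ++ [PySem.Int.floordiv n i] else l) = _
          rw [if_pos hq, ihh, if_pos (by simp [hg, hm]), if_pos (by simp [hg, hm, hq])]
          simp
      · have hm' : (PySem.Int.mod n i == 0) = false := by simpa using hm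
        rw [if_neg hm, ihh, if_neg (by simp [hm']), if_neg (by simp [hm'])]
    · rw [pvBLoop, if_neg hg]
      have hnil : ∀ j, j ∈ PySem.List.pyRange i (n + 1) 1 → ¬ (j * j ≤ n) := by
        intro j hj
        have hij : i ≤ j ∧ j < n + 1 := by
          have := (PySem.List.mem_pyRange_one).1 hj; exact this
        nlinarith [hij.1, hij.2]
      have hS : pvS n i = [] := by
        rw [pvS, List.filter_eq_nil_iff]
        intro j hj
        simp [hnil j hj]
      have hL : pvL n i = [] := by
        rw [pvL, List.map_eq_nil_iff, List.filter_eq_nil_iff]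
        intro j hj
        simp [hnil j hj]
      simp [hS, hL]

-- arithmetic facts about cofactors (1 <= n throughout)
lemma pv_fd (n j : Int) (hj : 1 ≤ j) : PySem.Int.floordiv n j = n / j :=
  PySem.Int.floordiv_eq_ediv_of_pos (by omega)

lemma pv_cof (n j : Int) (hn : 1 ≤ n) (hj : 1 ≤ j) (hd : j ∣ n) :
    (n / j) * j = n ∧ 1 ≤ n / j ∧ (n / j) ∣ n := by
  have h1 : n / j * j = n := Int.ediv_mul_cancel hd
  have h2 : 1 ≤ n / j := by
    by_cases h : 1 ≤ n / j
    · exact h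
    · nlinarith [lt_of_not_ge h]
  exact ⟨h1, h2, ⟨j, h1.symm⟩⟩

lemma pv_big (n j : Int) (hn : 1 ≤ n) (hj : 1 ≤ j) (hd : j ∣ n) (hs : j * j ≤ n)
    (hne : j ≠ n / j) : n < (n / j) * (n / j) := by
  have h1 : n / j * j = n := Int.ediv_mul_cancel hd
  have h2 : 1 ≤ n / j := (pv_cof n j hn hj hd).2.1
  have hle : j ≤ n / j := by nlinarith
  have hlt : j < n / j := lt_of_le_of_ne hle hne
  nlinarith

lemma pv_inv (n x : Int) (hn : 1 ≤ n) (hx : 1 ≤ x) (hd : x ∣ n) (hb : ¬ (x * x ≤ n)) :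
    1 ≤ n / x ∧ (n / x) ∣ n ∧ (n / x) * (n / x) ≤ n ∧ n / x ≠ n / (n / x) ∧ x = n / (n / x) := by
  obtain ⟨h1, h2, h3⟩ := pv_cof n x hn hx hd
  have hxx : x = n / (n / x) := by
    have e1 : n / (n / x) * (n / x) = n := Int.ediv_mul_cancel h3
    have e2 : x * (n / x) = n := by rw [mul_comm]; exact h1
    exact mul_right_cancel₀ (by omega) (e2.trans e1.symm)
  have hlt : n / x < x := by nlinarith
  refine ⟨h2, h3, by nlinarith, ?_, hxx⟩
  rw [← hxx]; omega

lemma pv_anti (n a b : Int) (hn : 1 ≤ n) (ha : 1 ≤ a) (hab : a < b) (hda : a ∣ n)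
    (hdb : b ∣ n) : n / b < n / a := by
  obtain ⟨ha1, ha2, _⟩ := pv_cof n a hn ha hda
  obtain ⟨hb1, hb2, _⟩ := pv_cof n b hn (by omega) hdb
  nlinarith

lemma mem_pvS (n x : Int) (hn : 1 ≤ n) : x ∈ pvS n 1 ↔ 1 ≤ x ∧ x ∣ n ∧ x * x ≤ n := by
  simp only [pvS, List.mem_filter, PySem.List.mem_pyRange_one, Bool.and_eq_true, decide_eq_true_eq]
  constructor
  · rintro ⟨⟨h1, _⟩, h2, h3⟩
    exact ⟨h1, by simpa [PySem.Int.mod_eq_zero_iff_dvd] using h3, h2⟩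
  · rintro ⟨h1, h2, h3⟩
    have hxn : x ≤ n := Int.le_of_dvd (by omega) h2
    exact ⟨⟨h1, by omega⟩, h3, by simpa [PySem.Int.mod_eq_zero_iff_dvd] using h2⟩

lemma mem_pvL (n y : Int) (hn : 1 ≤ n) :
    y ∈ pvL n 1 ↔ ∃ j, (1 ≤ j ∧ j ∣ n ∧ j * j ≤ n ∧ j ≠ n / j) ∧ y = n / j := by
  simp only [pvL, List.mem_map, List.mem_filter, PySem.List.mem_pyRange_one, Bool.and_eq_true,
    decide_eq_true_eq]
  constructor
  · rintro ⟨j, ⟨⟨h1, _⟩, ⟨h2, h3⟩, h4⟩, h5⟩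
    rw [pv_fd n j h1] at h4 h5
    exact ⟨j, ⟨h1, by simpa [PySem.Int.mod_eq_zero_iff_dvd] using h3, h2, h4⟩, h5.symm⟩
  · rintro ⟨j, ⟨h1, h2, h3, h4⟩, h5⟩
    have hjn : j ≤ n := Int.le_of_dvd (by omega) h2
    refine ⟨j, ⟨⟨h1, by omega⟩, ⟨h3, by simpa [PySem.Int.mod_eq_zero_iff_dvd] using h2⟩, ?_⟩, ?_⟩
    · rw [pv_fd n j h1]; exact h4
    · rw [pv_fd n j h1]; exact h5.symm

lemma pvS_sorted (n : Int) : (pvS n 1).Pairwise (· < ·) :=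
  (PySem.List.pairwise_lt_pyRange_one 1 (n + 1)).filter _

lemma pvL_src_sorted (n : Int) (hn : 1 ≤ n) : (pvL n 1).Pairwise (· > ·) := by
  rw [pvL]
  rw [List.pairwise_map]
  have hp : (PySem.List.pyRange 1 (n + 1) 1).Pairwise (· < ·) :=
    PySem.List.pairwise_lt_pyRange_one 1 (n + 1)
  have hf := hp.filter (fun j => decide (j * j ≤ n) && (PySem.Int.mod n j == 0) &&
    decide (j ≠ PySem.Int.floordiv n j))
  refine hf.imp_of_mem ?_
  intro a b hma hmb hab
  simp only [List.mem_filter, PySem.List.mem_pyRange_one, Bool.and_eq_true, decide_eq_true_eq] at hma hmb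
  obtain ⟨⟨ha1, _⟩, ⟨_, ha3⟩, _⟩ := hma
  obtain ⟨⟨hb1, _⟩, ⟨_, hb3⟩, _⟩ := hmb
  have hda : a ∣ n := by simpa [PySem.Int.mod_eq_zero_iff_dvd] using ha3
  have hdb : b ∣ n := by simpa [PySem.Int.mod_eq_zero_iff_dvd] using hb3
  rw [pv_fd n a ha1, pv_fd n b hb1]
  exact pv_anti n a b hn ha1 hab hda hdb

lemma pv_key (n : Int) (hn : 1 ≤ n) :
    (PySem.List.pyRange 1 (n + 1) 1).filter (fun j => PySem.Int.mod n j == 0) =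
      pvS n 1 ++ (pvL n 1).reverse := by
  have hmemD : ∀ x, x ∈ (PySem.List.pyRange 1 (n + 1) 1).filter
      (fun j => PySem.Int.mod n j == 0) ↔ 1 ≤ x ∧ x ∣ n := by
    intro x
    simp only [List.mem_filter, PySem.List.mem_pyRange_one]
    constructor
    · rintro ⟨⟨h1, _⟩, h2⟩
      exact ⟨h1, by simpa [PySem.Int.mod_eq_zero_iff_dvd] using h2⟩
    · rintro ⟨h1, h2⟩
      have := Int.le_of_dvd (by omega) h2
      exact ⟨⟨h1, by omega⟩, by simpa [PySem.Int.mod_eq_zero_iff_dvd] using h2⟩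
  have hmemR : ∀ x, x ∈ pvS n 1 ++ (pvL n 1).reverse ↔ 1 ≤ x ∧ x ∣ n := by
    intro x
    rw [List.mem_append, List.mem_reverse, mem_pvS n x hn, mem_pvL n x hn]
    constructor
    · rintro (⟨h1, h2, _⟩ | ⟨j, ⟨hj1, hj2, _, _⟩, hx⟩)
      · exact ⟨h1, h2⟩
      · obtain ⟨_, h2, h3⟩ := pv_cof n j hn hj1 hj2
        exact hx ▸ ⟨h2, h3⟩
    · rintro ⟨h1, h2⟩
      by_cases hb : x * x ≤ n
      · exact Or.inl ⟨h1, h2, hb⟩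
      · obtain ⟨g1, g2, g3, g4, g5⟩ := pv_inv n x hn h1 h2 hb
        exact Or.inr ⟨n / x, ⟨g1, g2, g3, g4⟩, g5⟩
  have hsortD : ((PySem.List.pyRange 1 (n + 1) 1).filter
      (fun j => PySem.Int.mod n j == 0)).Pairwise (· < ·) :=
    (PySem.List.pairwise_lt_pyRange_one 1 (n + 1)).filter _
  have hsortR : (pvS n 1 ++ (pvL n 1).reverse).Pairwise (· < ·) := by
    rw [List.pairwise_append]
    refine ⟨pvS_sorted n, ?_, ?_⟩
    · rw [List.pairwise_reverse]
      exact (pvL_src_sorted n hn).imp (fun h => h)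
    · intro x hx y hy
      rw [mem_pvS n x hn] at hx
      rw [List.mem_reverse, mem_pvL n y hn] at hy
      obtain ⟨hx1, _, hx3⟩ := hx
      obtain ⟨j, ⟨hj1, hj2, hj3, hj4⟩, hy5⟩ := hy
      have hbig := pv_big n j hn hj1 hj2 hj3 hj4
      have hy1 : 1 ≤ n / j := (pv_cof n j hn hj1 hj2).2.1
      rw [hy5]; nlinarith
  have hperm := (List.perm_ext_iff_of_nodup
    (hsortD.imp (fun h => ne_of_lt h)) (hsortR.imp (fun h => ne_of_lt h))).2
    (fun x => (hmemD x).trans (hmemR x).symm)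
  exact hperm.eq_of_pairwise (fun a b _ _ h h' => absurd h' (lt_asymm h)) hsortD hsortR

lemma pv_elem_eq (n : Int) : get_dividers n = pvDividersFast n := by
  by_cases hn : 1 ≤ n
  · rw [get_dividers, pvDividersFast]
    rw [pvBLoop_spec n (n.toNat) 1 [] [] le_rfl (by omega)]
    simp only [List.nil_append]
    rw [PySem.List.foldl_append_if_eq_filter]
    simpa using pv_key n hn
  · rw [get_dividers, pvDividersFast, pvBLoop]
    rw [PySem.List.pyRange_one_eq_nil (by omega)]
    rw [if_neg (by omega : ¬ ((1 : Int) * 1 ≤ n))]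
    simp

-- ===== VERDICT (by name: the statement is the Claim_ definition above) =====

theorem get_dividers_tab_spec : Claim_equal_get_dividers_tab := by
  intro tab _
  unfold Spec_get_dividers_tab get_dividers_tab get_dividers_tab_alt
  rw [PySem.List.foldl_pyRange_zero_pyGetD' tab 0 (fun acc x => acc ++ [get_dividers x]) []]
  rw [PySem.List.foldl_append_singleton_eq_map, PySem.List.foldl_append_singleton_eq_map]
  simp only [List.nil_append]
  exact List.map_congr_left (fun x _ => pv_elem_eq x)
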